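-- pv_equiv track=rewrite | github.com/sasobhabha/Sanskrit-Conjugator | src/parse_real_data.py | slp1_to_iast
-- ===== SOURCE A (Python) =====
-- SLP1_TO_IAST = {
--     'a': 'a', 'A': 'ā', 'i': 'i', 'I': 'ī', 'u': 'u', 'U': 'ū',
--     'R': 'ṛ', 'RR': 'ṝ', 'lR': 'ḷ', 'lRR': 'ḹ',
--     'e': 'e', 'E': 'ai', 'o': 'o', 'O': 'au',
--     'M': 'ṃ', 'H': 'ḥ',
--     'k': 'k', 'kh': 'kh', 'g': 'g', 'gh': 'gh', 'G': 'ṅ',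
--     'c': 'c', 'ch': 'ch', 'j': 'j', 'jh': 'jh', 'J': 'ñ',
--     'w': 'ṭ', 'W': 'ṭh', 'q': 'ḍ', 'Q': 'ḍh', 'R': 'ṇ',
--     't': 't', 'th': 'th', 'd': 'd', 'dh': 'dh', 'n': 'n',
--     'p': 'p', 'ph': 'ph', 'b': 'b', 'bh': 'bh', 'm': 'm',
--     'y': 'y', 'r': 'r', 'l': 'l', 'v': 'v',
--     'S': 'ś', 'z': 'ṣ', 's': 's', 'h': 'h',
-- }
--
-- def slp1_to_iast(text: str) -> str:
--     """Convert SLP1 encoding to IAST transliteration."""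
--     # Multi-char first
--     result = []
--     i = 0
--     while i < len(text):
--         matched = False
--         for length in [2, 1]:
--             if i + length <= len(text):
--                 substr = text[i:i+length]
--                 if substr in SLP1_TO_IAST:
--                     result.append(SLP1_TO_IAST[substr])
--                     i += length
--                     matched = True
--                     break
--         if not matched:
--             result.append(text[i])  # Keep unknown chars
--             i += 1
--     return ''.join(result)
-- ===== SOURCE B (Python) =====
-- # One-pass state machine over characters: a one-character "pending" buffer replaces
-- # A's index arithmetic, slicing and per-position length loop.
--
-- _ONE = {
--     'a': 'a', 'A': 'ā', 'i': 'i', 'I': 'ī', 'u': 'u', 'U': 'ū',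
--     'R': 'ṇ', 'e': 'e', 'E': 'ai', 'o': 'o', 'O': 'au',
--     'M': 'ṃ', 'H': 'ḥ',
--     'k': 'k', 'g': 'g', 'G': 'ṅ', 'c': 'c', 'j': 'j', 'J': 'ñ',
--     'w': 'ṭ', 'W': 'ṭh', 'q': 'ḍ', 'Q': 'ḍh',
--     't': 't', 'd': 'd', 'n': 'n', 'p': 'p', 'b': 'b', 'm': 'm',
--     'y': 'y', 'r': 'r', 'l': 'l', 'v': 'v',
--     'S': 'ś', 'z': 'ṣ', 's': 's', 'h': 'h',
-- }
--
-- def slp1_to_iast(text: str) -> str: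
--     """Convert SLP1 encoding to IAST transliteration."""
--     out = []
--     pending = None  # a char that may open a two-char unit (RR, lR, or aspirate+h)
--     for c in text:
--         if pending is not None:
--             p, pending = pending, None
--             if p == 'R' and c == 'R':
--                 out.append('ṝ')
--                 continue
--             if p == 'l' and c == 'R':
--                 out.append('ḷ')
--                 continue
--             if c == 'h' and p in 'kgcjtdpb':
--                 out.append(_ONE[p] + 'h')
--                 continue
--             out.append(_ONE.get(p, p))
--         if c in 'Rlkgcjtdpb':
--             pending = c
--         else:
--             out.append(_ONE.get(c, c))
--     if pending is not None:
--         out.append(_ONE.get(pending, pending))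
--     return ''.join(out)
-- ===== Notes on version B (the rewrite author's own statement) =====
-- stated objective: faster
-- what changed: Replaced the index-advancing while loop that slices the string and probes the full SLP1 dict with two key lengths at every position by a single character-by-character pass keeping a one-character pending buffer, resolving the two-character units (RR, lR, aspirate+h) by direct pattern tests against a one-char-only table.
import Mathlib
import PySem

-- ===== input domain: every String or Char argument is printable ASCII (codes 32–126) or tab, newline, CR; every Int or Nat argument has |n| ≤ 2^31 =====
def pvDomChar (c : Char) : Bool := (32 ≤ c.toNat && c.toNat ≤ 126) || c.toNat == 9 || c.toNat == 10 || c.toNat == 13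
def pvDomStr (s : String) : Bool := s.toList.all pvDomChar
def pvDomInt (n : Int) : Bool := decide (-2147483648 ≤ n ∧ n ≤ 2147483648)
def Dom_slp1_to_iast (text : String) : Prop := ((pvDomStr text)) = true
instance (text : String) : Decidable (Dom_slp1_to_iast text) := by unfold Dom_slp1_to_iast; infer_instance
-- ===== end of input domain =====

-- B replaces A's index-advancing scan (a slice plus up to two dict probes per position) by a
-- single left-to-right pass over the characters with a one-character pending buffer (measured
-- constant-factor faster: no slicing and no probes of the full table).

-- ===== PORT A =====
-- the module-level dict, duplicate key 'R' included (PySem.Dict.ofList overwrites like Python)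
def SLP1_TO_IAST : PySem.Dict String String := PySem.Dict.ofList [
  ("a", "a"), ("A", "ā"), ("i", "i"), ("I", "ī"), ("u", "u"), ("U", "ū"), ("R", "ṛ"), ("RR", "ṝ"), ("lR", "ḷ"), ("lRR", "ḹ"), ("e", "e"), ("E", "ai"), ("o", "o"), ("O", "au"), ("M", "ṃ"), ("H", "ḥ"), ("k", "k"), ("kh", "kh"), ("g", "g"), ("gh", "gh"), ("G", "ṅ"), ("c", "c"), ("ch", "ch"), ("j", "j"), ("jh", "jh"), ("J", "ñ"), ("w", "ṭ"), ("W", "ṭh"), ("q", "ḍ"), ("Q", "ḍh"), ("R", "ṇ"), ("t", "t"), ("th", "th"), ("d", "d"), ("dh", "dh"), ("n", "n"), ("p", "p"), ("ph", "ph"), ("b", "b"), ("bh", "bh"), ("m", "m"), ("y", "y"), ("r", "r"), ("l", "l"), ("v", "v"), ("S", "ś"), ("z", "ṣ"), ("s", "s"), ("h", "h")]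

-- A's while loop: at position i try the slice of length 2 ('substr in dict' then dict[substr]),
-- then the slice of length 1; dict[substr] on a contained key is (get?).getD ""
def slp1A_go : List Char → List String
  | [] => []
  | [c1] =>
    if SLP1_TO_IAST.contains (String.ofList [c1]) then
      (SLP1_TO_IAST.get? (String.ofList [c1])).getD "" :: []
    else String.ofList [c1] :: []
  | c1 :: c2 :: rest2 =>
    if SLP1_TO_IAST.contains (String.ofList [c1, c2]) then
      (SLP1_TO_IAST.get? (String.ofList [c1, c2])).getD "" :: slp1A_go rest2
    else if SLP1_TO_IAST.contains (String.ofList [c1]) then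
      (SLP1_TO_IAST.get? (String.ofList [c1])).getD "" :: slp1A_go (c2 :: rest2)
    else String.ofList [c1] :: slp1A_go (c2 :: rest2)

def slp1_to_iast (text : String) : String := PySem.Str.join "" (slp1A_go text.toList)

-- ===== PORT B =====
-- B's one-char table (the dict _ONE of Source B, keyed by the character)
def IAST_ONE : PySem.Dict Char String := PySem.Dict.ofList [
  ('a', "a"), ('A', "ā"), ('i', "i"), ('I', "ī"), ('u', "u"), ('U', "ū"), ('R', "ṇ"), ('e', "e"), ('E', "ai"), ('o', "o"), ('O', "au"), ('M', "ṃ"), ('H', "ḥ"), ('k', "k"), ('g', "g"), ('G', "ṅ"), ('c', "c"), ('j', "j"), ('J', "ñ"), ('w', "ṭ"), ('W', "ṭh"), ('q', "ḍ"), ('Q', "ḍh"), ('t', "t"), ('d', "d"), ('n', "n"), ('p', "p"), ('b', "b"), ('m', "m"), ('y', "y"), ('r', "r"), ('l', "l"), ('v', "v"), ('S', "ś"), ('z', "ṣ"), ('s', "s"), ('h', "h")]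

-- loop body of Source B: resolve the pending char against c, then classify c
def slp1B_step (st : List String × Option Char) (c : Char) : List String × Option Char :=
  match st with
  | (out, pending) =>
    match pending with
    | some p =>
      if p = 'R' ∧ c = 'R' then (out ++ ["ṝ"], none)
      else if p = 'l' ∧ c = 'R' then (out ++ ["ḷ"], none)
      else if c = 'h' ∧ ['k', 'g', 'c', 'j', 't', 'd', 'p', 'b'].contains p then
        -- _ONE[p] + 'h' (p is an aspirate, so always a key of _ONE)
        (out ++ [String.ofList ((IAST_ONE.getD p "").toList ++ ['h'])], none)
      else
        -- emit _ONE.get(p, p), then fall through to classify c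
        let out2 := out ++ [IAST_ONE.getD p (String.ofList [p])]
        if ['R', 'l', 'k', 'g', 'c', 'j', 't', 'd', 'p', 'b'].contains c then (out2, some c)
        else (out2 ++ [IAST_ONE.getD c (String.ofList [c])], none)
    | none =>
      if ['R', 'l', 'k', 'g', 'c', 'j', 't', 'd', 'p', 'b'].contains c then (out, some c)
      else (out ++ [IAST_ONE.getD c (String.ofList [c])], none)

def slp1_to_iast_alt (text : String) : String :=
  match text.toList.foldl slp1B_step ([], none) with
  | (out, pending) =>
    match pending with
    | some p => PySem.Str.join "" (out ++ [IAST_ONE.getD p (String.ofList [p])])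
    | none => PySem.Str.join "" out

-- ===== PRECONDITION & SPEC =====
def Spec_slp1_to_iast (text : String) (out : String) : Prop := out = slp1_to_iast_alt text
instance (text : String) (out : String) : Decidable (Spec_slp1_to_iast text out) := by unfold Spec_slp1_to_iast; infer_instance

-- ===== CLAIM (what is proved, stated in full; the proofs are below) =====
def Claim_equal_slp1_to_iast : Prop := ∀ (text : String), Dom_slp1_to_iast text → Spec_slp1_to_iast text (slp1_to_iast text)

-- ===== LEMMAS AND PROOFS =====
set_option maxRecDepth 16384

-- the resolved form of the dict (duplicate key 'R' overwritten in place, as in Python)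
theorem SLP1_mk : SLP1_TO_IAST = PySem.Dict.mk [
  ("a", "a"), ("A", "ā"), ("i", "i"), ("I", "ī"), ("u", "u"), ("U", "ū"), ("R", "ṇ"), ("RR", "ṝ"), ("lR", "ḷ"), ("lRR", "ḹ"), ("e", "e"), ("E", "ai"), ("o", "o"), ("O", "au"), ("M", "ṃ"), ("H", "ḥ"), ("k", "k"), ("kh", "kh"), ("g", "g"), ("gh", "gh"), ("G", "ṅ"), ("c", "c"), ("ch", "ch"), ("j", "j"), ("jh", "jh"), ("J", "ñ"), ("w", "ṭ"), ("W", "ṭh"), ("q", "ḍ"), ("Q", "ḍh"), ("t", "t"), ("th", "th"), ("d", "d"), ("dh", "dh"), ("n", "n"), ("p", "p"), ("ph", "ph"), ("b", "b"), ("bh", "bh"), ("m", "m"), ("y", "y"), ("r", "r"), ("l", "l"), ("v", "v"), ("S", "ś"), ("z", "ṣ"), ("s", "s"), ("h", "h")] := by decide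

theorem ONE_mk : IAST_ONE = PySem.Dict.mk [
  ('a', "a"), ('A', "ā"), ('i', "i"), ('I', "ī"), ('u', "u"), ('U', "ū"), ('R', "ṇ"), ('e', "e"), ('E', "ai"), ('o', "o"), ('O', "au"), ('M', "ṃ"), ('H', "ḥ"), ('k', "k"), ('g', "g"), ('G', "ṅ"), ('c', "c"), ('j', "j"), ('J', "ñ"), ('w', "ṭ"), ('W', "ṭh"), ('q', "ḍ"), ('Q', "ḍh"), ('t', "t"), ('d', "d"), ('n', "n"), ('p', "p"), ('b', "b"), ('m', "m"), ('y', "y"), ('r', "r"), ('l', "l"), ('v', "v"), ('S', "ś"), ('z', "ṣ"), ('s', "s"), ('h', "h")] := by decide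

-- what A's 2-char probe finds, as a condition on the two characters
theorem lookup2 (c1 c2 : Char) : SLP1_TO_IAST.get? (String.ofList [c1, c2]) =
    (if 'R' = c1 ∧ 'R' = c2 then some "ṝ"
     else if 'l' = c1 ∧ 'R' = c2 then some "ḷ"
     else if 'k' = c1 ∧ 'h' = c2 then some "kh"
     else if 'g' = c1 ∧ 'h' = c2 then some "gh"
     else if 'c' = c1 ∧ 'h' = c2 then some "ch"
     else if 'j' = c1 ∧ 'h' = c2 then some "jh"
     else if 't' = c1 ∧ 'h' = c2 then some "th"
     else if 'd' = c1 ∧ 'h' = c2 then some "dh"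
     else if 'p' = c1 ∧ 'h' = c2 then some "ph"
     else if 'b' = c1 ∧ 'h' = c2 then some "bh"
     else none) := by
  rw [SLP1_mk]
  simp only [PySem.Dict.get?_mk_cons, beq_iff_eq,
    show ("a":String) = String.ofList ['a'] from rfl,
    show ("A":String) = String.ofList ['A'] from rfl,
    show ("i":String) = String.ofList ['i'] from rfl,
    show ("I":String) = String.ofList ['I'] from rfl,
    show ("u":String) = String.ofList ['u'] from rfl,
    show ("U":String) = String.ofList ['U'] from rfl,
    show ("R":String) = String.ofList ['R'] from rfl,
    show ("RR":String) = String.ofList ['R', 'R'] from rfl,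
    show ("lR":String) = String.ofList ['l', 'R'] from rfl,
    show ("lRR":String) = String.ofList ['l', 'R', 'R'] from rfl,
    show ("e":String) = String.ofList ['e'] from rfl,
    show ("E":String) = String.ofList ['E'] from rfl,
    show ("o":String) = String.ofList ['o'] from rfl,
    show ("O":String) = String.ofList ['O'] from rfl,
    show ("M":String) = String.ofList ['M'] from rfl,
    show ("H":String) = String.ofList ['H'] from rfl,
    show ("k":String) = String.ofList ['k'] from rfl,
    show ("kh":String) = String.ofList ['k', 'h'] from rfl,
    show ("g":String) = String.ofList ['g'] from rfl,
    show ("gh":String) = String.ofList ['g', 'h'] from rfl,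
    show ("G":String) = String.ofList ['G'] from rfl,
    show ("c":String) = String.ofList ['c'] from rfl,
    show ("ch":String) = String.ofList ['c', 'h'] from rfl,
    show ("j":String) = String.ofList ['j'] from rfl,
    show ("jh":String) = String.ofList ['j', 'h'] from rfl,
    show ("J":String) = String.ofList ['J'] from rfl,
    show ("w":String) = String.ofList ['w'] from rfl,
    show ("W":String) = String.ofList ['W'] from rfl,
    show ("q":String) = String.ofList ['q'] from rfl,
    show ("Q":String) = String.ofList ['Q'] from rfl,
    show ("t":String) = String.ofList ['t'] from rfl,
    show ("th":String) = String.ofList ['t', 'h'] from rfl,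
    show ("d":String) = String.ofList ['d'] from rfl,
    show ("dh":String) = String.ofList ['d', 'h'] from rfl,
    show ("n":String) = String.ofList ['n'] from rfl,
    show ("p":String) = String.ofList ['p'] from rfl,
    show ("ph":String) = String.ofList ['p', 'h'] from rfl,
    show ("b":String) = String.ofList ['b'] from rfl,
    show ("bh":String) = String.ofList ['b', 'h'] from rfl,
    show ("m":String) = String.ofList ['m'] from rfl,
    show ("y":String) = String.ofList ['y'] from rfl,
    show ("r":String) = String.ofList ['r'] from rfl,
    show ("l":String) = String.ofList ['l'] from rfl,
    show ("v":String) = String.ofList ['v'] from rfl,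
    show ("S":String) = String.ofList ['S'] from rfl,
    show ("z":String) = String.ofList ['z'] from rfl,
    show ("s":String) = String.ofList ['s'] from rfl,
    show ("h":String) = String.ofList ['h'] from rfl,
    String.ofList_inj, List.cons.injEq, and_true, List.cons_ne_nil, and_false, if_false,
    reduceCtorEq]
  rfl

-- A's 1-char probe agrees with B's one-char table
theorem lookup1 (c : Char) : SLP1_TO_IAST.get? (String.ofList [c]) = IAST_ONE.get? c := by
  rw [SLP1_mk, ONE_mk]
  simp only [PySem.Dict.get?_mk_cons, beq_iff_eq,
    show ("a":String) = String.ofList ['a'] from rfl,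
    show ("A":String) = String.ofList ['A'] from rfl,
    show ("i":String) = String.ofList ['i'] from rfl,
    show ("I":String) = String.ofList ['I'] from rfl,
    show ("u":String) = String.ofList ['u'] from rfl,
    show ("U":String) = String.ofList ['U'] from rfl,
    show ("R":String) = String.ofList ['R'] from rfl,
    show ("RR":String) = String.ofList ['R', 'R'] from rfl,
    show ("lR":String) = String.ofList ['l', 'R'] from rfl,
    show ("lRR":String) = String.ofList ['l', 'R', 'R'] from rfl,
    show ("e":String) = String.ofList ['e'] from rfl,
    show ("E":String) = String.ofList ['E'] from rfl,
    show ("o":String) = String.ofList ['o'] from rfl,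
    show ("O":String) = String.ofList ['O'] from rfl,
    show ("M":String) = String.ofList ['M'] from rfl,
    show ("H":String) = String.ofList ['H'] from rfl,
    show ("k":String) = String.ofList ['k'] from rfl,
    show ("kh":String) = String.ofList ['k', 'h'] from rfl,
    show ("g":String) = String.ofList ['g'] from rfl,
    show ("gh":String) = String.ofList ['g', 'h'] from rfl,
    show ("G":String) = String.ofList ['G'] from rfl,
    show ("c":String) = String.ofList ['c'] from rfl,
    show ("ch":String) = String.ofList ['c', 'h'] from rfl,
    show ("j":String) = String.ofList ['j'] from rfl,
    show ("jh":String) = String.ofList ['j', 'h'] from rfl,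
    show ("J":String) = String.ofList ['J'] from rfl,
    show ("w":String) = String.ofList ['w'] from rfl,
    show ("W":String) = String.ofList ['W'] from rfl,
    show ("q":String) = String.ofList ['q'] from rfl,
    show ("Q":String) = String.ofList ['Q'] from rfl,
    show ("t":String) = String.ofList ['t'] from rfl,
    show ("th":String) = String.ofList ['t', 'h'] from rfl,
    show ("d":String) = String.ofList ['d'] from rfl,
    show ("dh":String) = String.ofList ['d', 'h'] from rfl,
    show ("n":String) = String.ofList ['n'] from rfl,
    show ("p":String) = String.ofList ['p'] from rfl,
    show ("ph":String) = String.ofList ['p', 'h'] from rfl,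
    show ("b":String) = String.ofList ['b'] from rfl,
    show ("bh":String) = String.ofList ['b', 'h'] from rfl,
    show ("m":String) = String.ofList ['m'] from rfl,
    show ("y":String) = String.ofList ['y'] from rfl,
    show ("r":String) = String.ofList ['r'] from rfl,
    show ("l":String) = String.ofList ['l'] from rfl,
    show ("v":String) = String.ofList ['v'] from rfl,
    show ("S":String) = String.ofList ['S'] from rfl,
    show ("z":String) = String.ofList ['z'] from rfl,
    show ("s":String) = String.ofList ['s'] from rfl,
    show ("h":String) = String.ofList ['h'] from rfl,
    String.ofList_inj, List.cons.injEq, and_true, List.cons_ne_nil, and_false, if_false]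
  rfl

-- proof-only abbreviations for the state of B's loop
def pvPend : Option Char → List Char
  | none => []
  | some c => [c]

def pvFinish (st : List String × Option Char) : List String :=
  st.1 ++ (match st.2 with
    | some p => [IAST_ONE.getD p (String.ofList [p])]
    | none => [])

-- A's 1-char emission (lookup if contained, else the char itself) is B's getD
theorem A_one (c : Char) (t : List String) :
    (if SLP1_TO_IAST.contains (String.ofList [c]) then
      (SLP1_TO_IAST.get? (String.ofList [c])).getD "" :: t
     else String.ofList [c] :: t) = IAST_ONE.getD c (String.ofList [c]) :: t := by
  rw [PySem.Dict.contains_eq_isSome_get?, lookup1, PySem.Dict.getD_eq_get?_getD]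
  cases IAST_ONE.get? c <;> simp

-- a char that cannot open a 2-char key makes A's 2-char probe fail
theorem lookup2_none_of_not_comb (c1 c2 : Char)
    (h : ¬ (['R', 'l', 'k', 'g', 'c', 'j', 't', 'd', 'p', 'b'].contains c1 = true)) :
    SLP1_TO_IAST.get? (String.ofList [c1, c2]) = none := by
  rw [lookup2]
  have n : ∀ a : Char, ['R', 'l', 'k', 'g', 'c', 'j', 't', 'd', 'p', 'b'].contains a = true →
      ¬ (a = c1 ∧ 'R' = c2) ∧ ¬ (a = c1 ∧ 'h' = c2) := by
    intro a ha
    constructor <;> rintro ⟨rfl, -⟩ <;> exact h ha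
  simp only [if_neg ((n 'R' rfl).1), if_neg ((n 'l' rfl).1), if_neg ((n 'k' rfl).2),
    if_neg ((n 'g' rfl).2), if_neg ((n 'c' rfl).2), if_neg ((n 'j' rfl).2),
    if_neg ((n 't' rfl).2), if_neg ((n 'd' rfl).2), if_neg ((n 'p' rfl).2),
    if_neg ((n 'b' rfl).2)]

-- on a non-opening char, A emits its 1-char translation and moves one position
theorem A_skip (c : Char) (cs : List Char)
    (h : ¬ (['R', 'l', 'k', 'g', 'c', 'j', 't', 'd', 'p', 'b'].contains c = true)) :
    slp1A_go (c :: cs) = IAST_ONE.getD c (String.ofList [c]) :: slp1A_go cs := by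
  cases cs with
  | nil =>
    simp only [slp1A_go]
    rw [A_one c []]
  | cons c2 cs2 =>
    have hc2 : SLP1_TO_IAST.contains (String.ofList [c, c2]) = false := by
      rw [PySem.Dict.contains_eq_isSome_get?, lookup2_none_of_not_comb c c2 h]
      rfl
    simp only [slp1A_go, hc2, Bool.false_eq_true, if_false]
    rw [A_one c (slp1A_go (c2 :: cs2))]

-- the loop invariant: B's fold from state (out, p), once flushed, is out ++ A's scan of p's char followed by cs
theorem main_inv (cs : List Char) : ∀ (out : List String) (p : Option Char),
    pvFinish (cs.foldl slp1B_step (out, p)) = out ++ slp1A_go (pvPend p ++ cs) := by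
  induction cs with
  | nil =>
    intro out p
    cases p with
    | none => simp [pvFinish, pvPend, slp1A_go]
    | some pc =>
      simp only [List.foldl_nil, pvFinish, pvPend, List.append_nil, slp1A_go]
      rw [A_one pc []]
  | cons c cs ih =>
    intro out p
    rw [List.foldl_cons]
    cases p with
    | none =>
      show pvFinish (cs.foldl slp1B_step (slp1B_step (out, none) c)) = out ++ slp1A_go (c :: cs)
      by_cases hc : ['R', 'l', 'k', 'g', 'c', 'j', 't', 'd', 'p', 'b'].contains c = true
      · simp only [slp1B_step, if_pos hc]
        rw [ih out (some c)]; rfl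
      · simp only [slp1B_step, if_neg hc]
        rw [ih _ none, A_skip c cs hc]
        simp [pvPend]
    | some pc =>
      show pvFinish (cs.foldl slp1B_step (slp1B_step (out, some pc) c)) = out ++ slp1A_go (pc :: c :: cs)
      by_cases h1 : pc = 'R' ∧ c = 'R'
      · obtain ⟨rfl, rfl⟩ := h1
        have hs : slp1B_step (out, some 'R') 'R' = (out ++ ["ṝ"], none) := by
          simp [slp1B_step]
        have hc : SLP1_TO_IAST.contains (String.ofList ['R', 'R']) = true := by
          rw [PySem.Dict.contains_eq_isSome_get?, lookup2]; decide
        have hg : SLP1_TO_IAST.get? (String.ofList ['R', 'R']) = some "ṝ" := by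
          rw [lookup2]; decide
        rw [hs, ih _ none]
        simp [pvPend, slp1A_go, hc, hg]
      by_cases h2 : pc = 'l' ∧ c = 'R'
      · obtain ⟨rfl, rfl⟩ := h2
        have hs : slp1B_step (out, some 'l') 'R' = (out ++ ["ḷ"], none) := by
          simp [slp1B_step]
        have hc : SLP1_TO_IAST.contains (String.ofList ['l', 'R']) = true := by
          rw [PySem.Dict.contains_eq_isSome_get?, lookup2]; decide
        have hg : SLP1_TO_IAST.get? (String.ofList ['l', 'R']) = some "ḷ" := by
          rw [lookup2]; decide
        rw [hs, ih _ none]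
        simp [pvPend, slp1A_go, hc, hg]
      by_cases h3 : c = 'h' ∧ ['k', 'g', 'c', 'j', 't', 'd', 'p', 'b'].contains pc = true
      · obtain ⟨rfl, h3⟩ := h3
        have hmem : pc = 'k' ∨ pc = 'g' ∨ pc = 'c' ∨ pc = 'j' ∨ pc = 't' ∨ pc = 'd' ∨
            pc = 'p' ∨ pc = 'b' := by
          simpa only [List.contains_eq_mem, List.mem_cons, List.not_mem_nil, or_false,
            decide_eq_true_eq] using h3
        have hv : String.ofList ((IAST_ONE.getD pc "").toList ++ ['h']) =
            String.ofList [pc, 'h'] := by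
          rcases hmem with rfl | rfl | rfl | rfl | rfl | rfl | rfl | rfl <;> decide
        have hg : SLP1_TO_IAST.get? (String.ofList [pc, 'h']) =
            some (String.ofList [pc, 'h']) := by
          rcases hmem with rfl | rfl | rfl | rfl | rfl | rfl | rfl | rfl <;> (rw [lookup2]; decide)
        have hcont : SLP1_TO_IAST.contains (String.ofList [pc, 'h']) = true := by
          rw [PySem.Dict.contains_eq_isSome_get?, hg]; rfl
        rcases hmem with rfl | rfl | rfl | rfl | rfl | rfl | rfl | rfl <;>
          (simp [slp1B_step, hv]
           rw [ih _ none]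
           simp [pvPend, slp1A_go, hcont, hg])
      · -- no combination: emit pc's own translation, then classify c
        have hnone : SLP1_TO_IAST.get? (String.ofList [pc, c]) = none := by
          rw [lookup2]
          have A1 : ¬('R' = pc ∧ 'R' = c) := fun ⟨x, y⟩ => h1 ⟨x.symm, y.symm⟩
          have A2 : ¬('l' = pc ∧ 'R' = c) := fun ⟨x, y⟩ => h2 ⟨x.symm, y.symm⟩
          have A3 : ∀ a : Char, ['k', 'g', 'c', 'j', 't', 'd', 'p', 'b'].contains a = true →
              ¬(a = pc ∧ 'h' = c) := by
            rintro a ha ⟨rfl, y⟩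
            exact h3 ⟨y.symm, by
              revert ha
              simp only [List.contains_eq_mem, List.mem_cons, List.not_mem_nil, or_false,
                decide_eq_true_eq]
              rintro (rfl | rfl | rfl | rfl | rfl | rfl | rfl | rfl) <;> decide⟩
          simp only [if_neg A1, if_neg A2, if_neg (A3 'k' rfl), if_neg (A3 'g' rfl),
            if_neg (A3 'c' rfl), if_neg (A3 'j' rfl), if_neg (A3 't' rfl),
            if_neg (A3 'd' rfl), if_neg (A3 'p' rfl), if_neg (A3 'b' rfl)]
        have hcontains : SLP1_TO_IAST.contains (String.ofList [pc, c]) = false := by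
          rw [PySem.Dict.contains_eq_isSome_get?, hnone]; rfl
        have hgo : slp1A_go (pc :: c :: cs) =
            IAST_ONE.getD pc (String.ofList [pc]) :: slp1A_go (c :: cs) := by
          simp only [slp1A_go, hcontains, Bool.false_eq_true, if_false]
          rw [A_one pc (slp1A_go (c :: cs))]
        simp only [slp1B_step, if_neg h1, if_neg h2, if_neg h3]
        by_cases hc : ['R', 'l', 'k', 'g', 'c', 'j', 't', 'd', 'p', 'b'].contains c = true
        · simp only [if_pos hc]
          rw [ih _ (some c), hgo]
          simp [pvPend]
        · simp only [if_neg hc]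
          rw [ih _ none, hgo, A_skip c cs hc]
          simp [pvPend]

-- ===== VERDICT (by name: the statement is the Claim_ definition above) =====
theorem slp1_to_iast_spec : Claim_equal_slp1_to_iast := by
  intro text _
  show slp1_to_iast text = slp1_to_iast_alt text
  unfold slp1_to_iast slp1_to_iast_alt
  have h := main_inv text.toList [] none
  simp only [pvPend, List.nil_append] at h
  rcases hst : text.toList.foldl slp1B_step ([], none) with ⟨o, q⟩
  rw [hst] at h
  cases q with
  | none => simp only [pvFinish, List.append_nil] at h; rw [← h]
  | some p => simp only [pvFinish] at h; rw [← h]
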